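-- pv_equiv track=rewrite | github.com/QuEraComputing/bloqade | src/bloqade/noise/native/model.py | deconflict
-- ===== SOURCE A (Python) =====
-- from typing import Dict, List, Tuple
--
-- def deconflict(
--     ctrls: List[int], qargs: List[int]
-- ) -> List[Tuple[Tuple[int, ...], Tuple[int, ...]]]:
--
--     # sort by ctrl qubit first to guarantee that they will be in ascending order
--     sorted_pairs = sorted(zip(ctrls, qargs), key=lambda x: x[0])
--
--     groups = []
--     # group by qarg only putting it in a group if the qarg is greater than the last qarg in the group
--     # thus ensuring that the qargs are in ascending order
--     while len(sorted_pairs) > 0: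
--         ctrl, qarg = sorted_pairs.pop(0)
--
--         found = False
--         for group in groups:
--             if group[-1][1] < qarg:
--                 group.append((ctrl, qarg))
--                 found = True
--                 break
--         if not found:
--             groups.append([(ctrl, qarg)])
--
--     return [tuple(zip(*group)) for group in groups]
-- ===== SOURCE B (Python) =====
-- def deconflict(ctrls, qargs):
--     # Patience-style grouping: keep the last qarg of each group in `tails`
--     # (invariant: non-increasing), binary-search the leftmost group whose
--     # tail < qarg, and keep the ctrl/qarg columns of each group directly.
--     pairs = sorted(zip(ctrls, qargs), key=lambda x: x[0])
--     tails = []    # tails[i] = last qarg of group i (non-increasing)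
--     gctrls = []   # gctrls[i] = ctrl column of group i
--     gqargs = []   # gqargs[i] = qarg column of group i
--     for c, q in pairs:
--         lo, hi = 0, len(tails)
--         while lo < hi:
--             mid = (lo + hi) // 2
--             if tails[mid] < q:
--                 hi = mid
--             else:
--                 lo = mid + 1
--         if lo == len(tails):
--             tails.append(q)
--             gctrls.append([c])
--             gqargs.append([q])
--         else:
--             tails[lo] = q
--             gctrls[lo].append(c)
--             gqargs[lo].append(q)
--     return [(tuple(cs), tuple(qs)) for cs, qs in zip(gctrls, gqargs)]
-- ===== Notes on version B (the rewrite author's own statement) =====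
-- stated objective: faster
-- what changed: Replaces A's linear scan over the nested groups list (and O(n) pop(0)) by a patience-sorting scheme: a separate non-increasing array of group tails searched by binary search, with ctrl/qarg columns of each group maintained directly.
import Mathlib
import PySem

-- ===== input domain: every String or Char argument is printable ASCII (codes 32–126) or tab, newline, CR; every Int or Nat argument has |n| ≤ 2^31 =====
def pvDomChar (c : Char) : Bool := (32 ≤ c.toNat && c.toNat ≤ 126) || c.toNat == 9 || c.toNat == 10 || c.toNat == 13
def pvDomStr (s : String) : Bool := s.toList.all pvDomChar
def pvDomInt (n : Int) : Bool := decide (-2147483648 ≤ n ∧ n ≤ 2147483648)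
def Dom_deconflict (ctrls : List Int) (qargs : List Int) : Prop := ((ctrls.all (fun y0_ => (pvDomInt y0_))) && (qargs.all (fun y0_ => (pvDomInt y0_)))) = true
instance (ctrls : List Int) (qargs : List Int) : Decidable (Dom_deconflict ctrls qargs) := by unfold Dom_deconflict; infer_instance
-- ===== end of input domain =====

-- B replaces A's O(n^2) linear scan over the groups list by a patience-sorting scheme
-- (non-increasing tail array + binary search + per-group columns); objective: faster.

-- ===== PORT A =====
-- the inner 'for group in groups: if group[-1][1] < qarg: append; break' loop;
-- groups built by A are always nonempty, so the getD default of group[-1] is never used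
def pvInsertA (c q : Int) : List (List (Int × Int)) → List (List (Int × Int))
  | [] => [[(c, q)]]
  | g :: rest =>
    if ((PySem.List.pyGet? g (-1)).getD (0, 0)).2 < q then (g ++ [(c, q)]) :: rest
    else g :: pvInsertA c q rest

def deconflict (ctrls : List Int) (qargs : List Int) : List (List (List Int)) :=
  let sorted_pairs := PySem.List.sorted (ctrls.zip qargs) (fun x => x.1)
  -- 'while len(sorted_pairs) > 0: pop(0); …' consumes the list front to back
  let groups := sorted_pairs.foldl (fun gs p => pvInsertA p.1 p.2 gs) []
  -- tuple(zip(*group)) = (ctrl column, qarg column)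
  groups.map (fun g => [g.map (fun x => x.1), g.map (fun x => x.2)])

-- ===== PORT B =====
-- the hand-written binary search of Source B ('while lo < hi: …'); tails[mid] is always
-- in range when called with hi ≤ tails.length, so the getD default is never used
def pvBisect (tails : List Int) (q : Int) (lo hi : Nat) : Nat :=
  if _h : lo < hi then
    if tails.getD ((lo + hi) / 2) 0 < q then pvBisect tails q lo ((lo + hi) / 2)
    else pvBisect tails q ((lo + hi) / 2 + 1) hi
  else lo
termination_by hi - lo
decreasing_by all_goals omega

def pvStepB (st : List Int × List (List Int) × List (List Int)) (p : Int × Int) :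
    List Int × List (List Int) × List (List Int) :=
  let (tails, gctrls, gqargs) := st
  let lo := pvBisect tails p.2 0 tails.length
  if lo = tails.length then
    (tails ++ [p.2], gctrls ++ [[p.1]], gqargs ++ [[p.2]])
  else
    (tails.set lo p.2, gctrls.modify lo (fun cs => cs ++ [p.1]),
     gqargs.modify lo (fun qs => qs ++ [p.2]))

def deconflict_alt (ctrls : List Int) (qargs : List Int) : List (List (List Int)) :=
  let pairs := PySem.List.sorted (ctrls.zip qargs) (fun x => x.1)
  let st := pairs.foldl pvStepB ([], [], [])
  (st.2.1.zip st.2.2).map (fun p => [p.1, p.2])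

-- ===== PRECONDITION & SPEC =====
def Spec_deconflict (ctrls : List Int) (qargs : List Int) (out : List (List (List Int))) : Prop := out = deconflict_alt ctrls qargs
instance (ctrls : List Int) (qargs : List Int) (out : List (List (List Int))) : Decidable (Spec_deconflict ctrls qargs out) := by unfold Spec_deconflict; infer_instance

-- ===== CLAIM (what is proved, stated in full; the proofs are below) =====
def Claim_equal_deconflict : Prop := ∀ (ctrls : List Int) (qargs : List Int), Dom_deconflict ctrls qargs → Spec_deconflict ctrls qargs (deconflict ctrls qargs)

-- ===== LEMMAS AND PROOFS =====

-- last qarg of a group, exactly as A's test reads it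
def pvTailQ (g : List (Int × Int)) : Int := ((PySem.List.pyGet? g (-1)).getD (0, 0)).2

theorem pvBisect_spec (tails : List Int) (q : Int)
    (mono : ∀ i j, i ≤ j → j < tails.length → tails.getD i 0 < q → tails.getD j 0 < q)
    (lo hi : Nat) (hlh : lo ≤ hi) (hhl : hi ≤ tails.length)
    (hlo : ∀ j < lo, ¬ tails.getD j 0 < q)
    (hhi : ∀ j, hi ≤ j → j < tails.length → tails.getD j 0 < q) :
    (∀ j < pvBisect tails q lo hi, ¬ tails.getD j 0 < q) ∧
      pvBisect tails q lo hi ≤ tails.length ∧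
      (pvBisect tails q lo hi < tails.length → tails.getD (pvBisect tails q lo hi) 0 < q) := by
  rw [pvBisect]
  split
  · split
    · exact pvBisect_spec tails q mono lo ((lo + hi) / 2) (by omega) (by omega) hlo
        (fun j hj hjl => mono ((lo + hi) / 2) j hj hjl (by assumption))
    · refine pvBisect_spec tails q mono ((lo + hi) / 2 + 1) hi (by omega) hhl ?_ hhi
      intro j hj hlt
      rename_i hmid
      exact hmid (mono j ((lo + hi) / 2) (by omega) (by omega) hlt)
  · exact ⟨hlo, by omega, fun h => hhi lo (by omega) h⟩
termination_by hi - lo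
decreasing_by all_goals omega

theorem pvFindIdx_eq_of (xs : List Int) (q : Int) (l : Nat) (hle : l ≤ xs.length)
    (h1 : ∀ j < l, ¬ xs.getD j 0 < q)
    (h2 : l < xs.length → xs.getD l 0 < q) :
    xs.findIdx (fun t => decide (t < q)) = l := by
  induction xs generalizing l with
  | nil =>
    have : l = 0 := by simpa using hle
    simp [this]
  | cons x xs ih =>
    cases l with
    | zero =>
      have : x < q := by simpa using h2 (by simp)
      simp [List.findIdx_cons, this]
    | succ l =>
      have hx : ¬ x < q := by simpa using h1 0 (by omega)
      simp only [List.findIdx_cons, hx, decide_false, cond_false]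
      have := ih l (by simpa using hle)
        (fun j hj => by simpa using h1 (j + 1) (by omega))
        (fun hl => by simpa using h2 (by simpa using hl))
      omega

theorem pvInsertA_eq (c q : Int) (gs : List (List (Int × Int))) :
    pvInsertA c q gs =
      (if gs.findIdx (fun g => decide (pvTailQ g < q)) = gs.length
       then gs ++ [[(c, q)]]
       else gs.modify (gs.findIdx (fun g => decide (pvTailQ g < q))) (fun g => g ++ [(c, q)])) := by
  induction gs with
  | nil => simp [pvInsertA]
  | cons g rest ih =>
    by_cases hg : pvTailQ g < q
    · simp only [pvInsertA]
      rw [show ((PySem.List.pyGet? g (-1)).getD ((0 : Int), (0 : Int))).2 = pvTailQ g from rfl,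
        if_pos hg]
      have hg' : decide (pvTailQ g < q) = true := by simpa using hg
      simp [List.findIdx_cons, hg', List.modify]
    · simp only [pvInsertA]
      rw [show ((PySem.List.pyGet? g (-1)).getD ((0 : Int), (0 : Int))).2 = pvTailQ g from rfl,
        if_neg hg, ih]
      have hg' : decide (pvTailQ g < q) = false := by simpa using hg
      simp only [List.findIdx_cons, List.length_cons, hg', cond_false]
      by_cases hl : rest.findIdx (fun g => decide (pvTailQ g < q)) = rest.length
      · simp [hl]
      · simp [hl, List.modify]

theorem pvMap_modify {α β : Type} (f : α → β) (h : α → α) (h' : β → β)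
    (hc : ∀ a, f (h a) = h' (f a)) (l : List α) (i : Nat) :
    (l.modify i h).map f = (l.map f).modify i h' := by
  induction l generalizing i with
  | nil => simp
  | cons x xs ih =>
    cases i with
    | zero => simp [List.modify, hc]
    | succ n =>
      rw [show (x :: xs).modify (n + 1) h = x :: xs.modify n h from by simp [List.modify]]
      rw [List.map_cons, List.map_cons,
        show (f x :: List.map f xs).modify (n + 1) h' = f x :: (List.map f xs).modify n h' from by
          simp [List.modify]]
      rw [ih]

theorem pvModify_const {α : Type} (l : List α) (i : Nat) (a : α) :
    l.modify i (fun _ => a) = l.set i a := by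
  induction l generalizing i with
  | nil => simp
  | cons x xs ih =>
    cases i with
    | zero => simp [List.modify]
    | succ n =>
      rw [show (x :: xs).modify (n + 1) (fun _ => a) = x :: xs.modify n (fun _ => a) from by
        simp [List.modify]]
      simp [ih]

theorem pvTailQ_append (g : List (Int × Int)) (c q : Int) : pvTailQ (g ++ [(c, q)]) = q := by
  simp [pvTailQ, PySem.List.pyGet?_neg_one_append_singleton]

theorem pvMono (tails : List Int) (anti : tails.Pairwise (fun a b => b ≤ a)) (q : Int) :
    ∀ i j, i ≤ j → j < tails.length → tails.getD i 0 < q → tails.getD j 0 < q := by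
  intro i j hij hj hi
  rcases eq_or_lt_of_le hij with rfl | hlt
  · exact hi
  · have hi' : i < tails.length := lt_of_le_of_lt hij hj
    have hle := (List.pairwise_iff_getElem.mp anti) i j hi' hj hlt
    rw [List.getD_eq_getElem _ _ hj]
    rw [List.getD_eq_getElem _ _ hi'] at hi
    omega

theorem pvStep_eq (c q : Int) (gs : List (List (Int × Int)))
    (anti : (gs.map pvTailQ).Pairwise (fun a b => b ≤ a)) :
    pvStepB (gs.map pvTailQ, gs.map (List.map Prod.fst), gs.map (List.map Prod.snd)) (c, q)
      = ((pvInsertA c q gs).map pvTailQ, (pvInsertA c q gs).map (List.map Prod.fst),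
         (pvInsertA c q gs).map (List.map Prod.snd)) := by
  obtain ⟨h1, h2, h3⟩ := pvBisect_spec (gs.map pvTailQ) q (pvMono _ anti q) 0
    (gs.map pvTailQ).length (by omega) (le_refl _) (by omega) (by omega)
  have hfind : (gs.map pvTailQ).findIdx (fun t => decide (t < q))
      = pvBisect (gs.map pvTailQ) q 0 (gs.map pvTailQ).length :=
    pvFindIdx_eq_of _ q _ h2 h1 h3
  have hfind' : gs.findIdx (fun g => decide (pvTailQ g < q))
      = pvBisect (gs.map pvTailQ) q 0 (gs.map pvTailQ).length := by
    rw [← hfind, List.findIdx_map]; rfl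
  rw [pvInsertA_eq, hfind']
  simp only [pvStepB, List.length_map] at h1 h2 h3 ⊢
  by_cases hil : pvBisect (gs.map pvTailQ) q 0 gs.length = gs.length
  · rw [if_pos hil, if_pos hil]
    simp only [Prod.mk.injEq]
    refine ⟨?_, ?_, ?_⟩ <;> simp [pvTailQ, PySem.List.pyGet?_neg_one]
  · rw [if_neg hil, if_neg hil]
    simp only [Prod.mk.injEq]
    refine ⟨?_, ?_, ?_⟩
    · rw [pvMap_modify pvTailQ (fun g => g ++ [(c, q)]) (fun _ => q)
        (fun g => pvTailQ_append g c q) gs _, pvModify_const]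
    · rw [pvMap_modify (List.map Prod.fst) (fun g => g ++ [(c, q)]) (fun cs => cs ++ [c])
        (fun g => by simp) gs _]
    · rw [pvMap_modify (List.map Prod.snd) (fun g => g ++ [(c, q)]) (fun qs => qs ++ [q])
        (fun g => by simp) gs _]

theorem pvAnti_preserved (c q : Int) (gs : List (List (Int × Int)))
    (anti : (gs.map pvTailQ).Pairwise (fun a b => b ≤ a)) :
    ((pvInsertA c q gs).map pvTailQ).Pairwise (fun a b => b ≤ a) := by
  obtain ⟨h1, h2, h3⟩ := pvBisect_spec (gs.map pvTailQ) q (pvMono _ anti q) 0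
    (gs.map pvTailQ).length (by omega) (le_refl _) (by omega) (by omega)
  have hfind : (gs.map pvTailQ).findIdx (fun t => decide (t < q))
      = pvBisect (gs.map pvTailQ) q 0 (gs.map pvTailQ).length :=
    pvFindIdx_eq_of _ q _ h2 h1 h3
  have hfind' : gs.findIdx (fun g => decide (pvTailQ g < q))
      = pvBisect (gs.map pvTailQ) q 0 (gs.map pvTailQ).length := by
    rw [← hfind, List.findIdx_map]; rfl
  rw [pvInsertA_eq, hfind']
  simp only [List.length_map] at h1 h2 h3 ⊢
  by_cases hil : pvBisect (gs.map pvTailQ) q 0 gs.length = gs.length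
  · rw [if_pos hil]
    rw [List.map_append, List.pairwise_append]
    refine ⟨anti, by simp, ?_⟩
    intro a ha b hb
    have hbq : b = q := by
      simp [pvTailQ, PySem.List.pyGet?_neg_one] at hb
      omega
    obtain ⟨j, hj, rfl⟩ := List.mem_iff_getElem.mp ha
    have hj' : j < pvBisect (gs.map pvTailQ) q 0 gs.length := by
      rw [hil]; simpa using hj
    have := h1 j hj'
    rw [List.getD_eq_getElem _ _ hj] at this
    omega
  · rw [if_neg hil]
    have hlt : pvBisect (gs.map pvTailQ) q 0 gs.length < gs.length := by omega
    rw [pvMap_modify pvTailQ (fun g => g ++ [(c, q)]) (fun _ => q)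
      (fun g => pvTailQ_append g c q) gs _, pvModify_const]
    have hlen : pvBisect (gs.map pvTailQ) q 0 gs.length < (gs.map pvTailQ).length := by
      simpa using hlt
    have hIq := h3 hlt
    rw [List.getD_eq_getElem _ _ hlen] at hIq
    rw [List.pairwise_iff_getElem]
    intro a b hha hhb hab
    simp only [List.length_set, List.length_map] at hha hhb
    rw [List.getElem_set, List.getElem_set]
    have anti' := List.pairwise_iff_getElem.mp anti
    by_cases hia : pvBisect (gs.map pvTailQ) q 0 gs.length = a
    · subst hia
      rw [if_pos rfl, if_neg (by omega)]
      have := anti' _ b (by simpa using hha) (by simpa using hhb) hab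
      omega
    · rw [if_neg hia]
      by_cases hib : pvBisect (gs.map pvTailQ) q 0 gs.length = b
      · rw [if_pos hib]
        have := h1 a (by omega)
        rw [List.getD_eq_getElem _ _ (by simpa using hha)] at this
        omega
      · rw [if_neg hib]
        exact anti' a b (by simpa using hha) (by simpa using hhb) hab

theorem pvMain (ps : List (Int × Int)) (gs : List (List (Int × Int)))
    (anti : (gs.map pvTailQ).Pairwise (fun a b => b ≤ a)) :
    ps.foldl pvStepB (gs.map pvTailQ, gs.map (List.map Prod.fst), gs.map (List.map Prod.snd))
      = ((ps.foldl (fun gs p => pvInsertA p.1 p.2 gs) gs).map pvTailQ,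
         (ps.foldl (fun gs p => pvInsertA p.1 p.2 gs) gs).map (List.map Prod.fst),
         (ps.foldl (fun gs p => pvInsertA p.1 p.2 gs) gs).map (List.map Prod.snd)) := by
  induction ps generalizing gs with
  | nil => rfl
  | cons p ps ih =>
    obtain ⟨c, q⟩ := p
    simp only [List.foldl_cons]
    rw [pvStep_eq c q gs anti]
    exact ih (pvInsertA c q gs) (pvAnti_preserved c q gs anti)

-- ===== VERDICT (by name: the statement is the Claim_ definition above) =====
theorem deconflict_spec : Claim_equal_deconflict := by
  intro ctrls qargs _
  unfold Spec_deconflict deconflict deconflict_alt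
  have h := pvMain (PySem.List.sorted (ctrls.zip qargs) (fun x => x.1)) [] (by simp)
  simp only [List.map_nil] at h
  simp only [h, List.zip_map', List.map_map]
  simp [Function.comp]
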